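-- pv_equiv track=rewrite | github.com/miroslav540/HMPY3 | TASK5.PY | Fibonacci_Neg
-- ===== SOURCE A (Python) =====
-- def Fibonacci_Neg(num):
--     Fibonacci_Negative = []
--     fib1 = 1
--     fib2 = -1
--     for i in range(num):
--         if i == 0:
--             Fibonacci_Negative.insert(i, fib1)
--         elif i == 1:
--             Fibonacci_Negative.insert(i, fib2)
--         else:
--             Fibonacci_Negative.insert(i, fib1 - fib2)
--             time = fib2
--             fib2 = fib1 - fib2
--             fib1 = time
--     return Fibonacci_Negative
-- ===== SOURCE B (Python) =====
-- def Fibonacci_Neg(num):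
--     result = []
--     a, b = 1, 1
--     for i in range(num):
--         result.append(a if i % 2 == 0 else -a)
--         a, b = b, a + b
--     return result
-- ===== Notes on version B (the rewrite author's own statement) =====
-- stated objective: simpler
-- what changed: B computes positive Fibonacci magnitudes with a plain pair recurrence and negates every second element per the alternating-sign identity for negative-index Fibonacci numbers, dropping A's two special-cased first iterations and its signed-difference update.
import Mathlib
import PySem

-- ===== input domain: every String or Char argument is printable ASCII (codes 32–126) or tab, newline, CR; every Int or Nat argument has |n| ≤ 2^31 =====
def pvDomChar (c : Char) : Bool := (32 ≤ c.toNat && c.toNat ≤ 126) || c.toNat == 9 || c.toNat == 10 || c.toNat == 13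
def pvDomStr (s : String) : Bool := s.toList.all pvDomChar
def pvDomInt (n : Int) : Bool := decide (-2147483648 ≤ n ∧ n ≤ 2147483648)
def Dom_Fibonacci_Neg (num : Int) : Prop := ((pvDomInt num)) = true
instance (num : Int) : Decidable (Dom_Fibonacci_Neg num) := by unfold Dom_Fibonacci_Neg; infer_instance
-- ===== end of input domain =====

-- B builds positive Fibonacci magnitudes and applies the sign identity F(-(i+1)) = (-1)^i·F(i+1),
-- removing A's i==0/i==1 special cases and its signed-difference update (objective: simpler).

-- ===== PORT A =====
-- loop body of A: state (Fibonacci_Negative, fib1, fib2)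
def FibonacciNegStepA (st : List Int × Int × Int) (i : Int) : List Int × Int × Int :=
  let (lst, fib1, fib2) := st
  if i == 0 then (PySem.List.insert lst i fib1, fib1, fib2)
  else if i == 1 then (PySem.List.insert lst i fib2, fib1, fib2)
  else (PySem.List.insert lst i (fib1 - fib2), fib2, fib1 - fib2)

def Fibonacci_Neg (num : Int) : List Int :=
  ((PySem.List.pyRange 0 num 1).foldl FibonacciNegStepA ([], 1, -1)).1

-- ===== PORT B =====
-- loop body of B: state (result, a, b)
def FibonacciNegStepB (st : List Int × Int × Int) (i : Int) : List Int × Int × Int :=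
  let (res, a, b) := st
  (res ++ [if i % 2 == 0 then a else -a], b, a + b)

def Fibonacci_Neg_alt (num : Int) : List Int :=
  ((PySem.List.pyRange 0 num 1).foldl FibonacciNegStepB ([], 1, 1)).1

-- ===== PRECONDITION & SPEC =====
def Spec_Fibonacci_Neg (num : Int) (out : List Int) : Prop := out = Fibonacci_Neg_alt num
instance (num : Int) (out : List Int) : Decidable (Spec_Fibonacci_Neg num out) := by unfold Spec_Fibonacci_Neg; infer_instance

-- ===== CLAIM (what is proved, stated in full; the proofs are below) =====
def Claim_equal_Fibonacci_Neg : Prop := ∀ (num : Int), Dom_Fibonacci_Neg num → Spec_Fibonacci_Neg num (Fibonacci_Neg num)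

-- ===== LEMMAS AND PROOFS =====

-- positive Fibonacci magnitudes: fibMag n = F(n+1)
def fibMag : Nat → Int
  | 0 => 1
  | 1 => 1
  | (n+2) => fibMag n + fibMag (n+1)

-- sign of index n
def fsgn (n : Nat) : Int := if n % 2 = 0 then 1 else -1

-- the common output list
def outL (n : Nat) : List Int := (List.range n).map (fun i => fsgn i * fibMag i)

-- A's fib1 after n iterations
def f1A (n : Nat) : Int := if n ≤ 1 then 1 else fsgn (n-2) * fibMag (n-2)
-- A's fib2 after n iterations
def f2A (n : Nat) : Int := if n ≤ 1 then -1 else fsgn (n-1) * fibMag (n-1)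

lemma fsgn_succ (m : Nat) : fsgn (m+1) = -fsgn m := by
  rcases Nat.even_or_odd m with h | h
  · simp [fsgn, Nat.even_iff.mp h, Nat.succ_mod_two_eq_one_iff.mpr (Nat.even_iff.mp h)]
  · simp [fsgn, Nat.odd_iff.mp h, Nat.succ_mod_two_eq_zero_iff.mpr (Nat.odd_iff.mp h)]

lemma keyA (m : Nat) : fsgn m * fibMag m - fsgn (m+1) * fibMag (m+1) = fsgn (m+2) * fibMag (m+2) := by
  rw [fsgn_succ, show fsgn (m+2) = fsgn m by rw [fsgn_succ, fsgn_succ]; ring,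
      show fibMag (m+2) = fibMag m + fibMag (m+1) from rfl]
  ring

lemma outL_succ (n : Nat) : outL (n+1) = outL n ++ [fsgn n * fibMag n] := by
  simp [outL, List.range_succ]

lemma outL_len (n : Nat) : (outL n).length = n := by simp [outL]

lemma insert_end (xs : List Int) (n : Nat) (v : Int) (h : xs.length = n) :
    PySem.List.insert xs (n : Int) v = xs ++ [v] := by
  subst h
  have := PySem.List.insert_len xs v
  simpa [PySem.List.len] using this

lemma stepB_eq (m : Nat) :
    FibonacciNegStepB (outL m, fibMag m, fibMag (m+1)) (m : Int)
      = (outL (m+1), fibMag (m+1), fibMag (m+2)) := by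
  unfold FibonacciNegStepB
  dsimp only
  rw [show ((m : Int) % 2) = ((m % 2 : Nat) : Int) from (Int.natCast_mod m 2).symm]
  rcases Nat.even_or_odd m with h | h
  · rw [if_pos (by simp [Nat.even_iff.mp h])]
    rw [show outL (m+1) = outL m ++ [fsgn m * fibMag m] from outL_succ m]
    simp [fsgn, Nat.even_iff.mp h, show fibMag (m+2) = fibMag m + fibMag (m+1) from rfl]
  · rw [if_neg (by simp [Nat.odd_iff.mp h])]
    rw [show outL (m+1) = outL m ++ [fsgn m * fibMag m] from outL_succ m]
    simp [fsgn, Nat.odd_iff.mp h, show fibMag (m+2) = fibMag m + fibMag (m+1) from rfl]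

lemma loopB_inv (n : Nat) :
    (PySem.List.pyRange 0 (n : Int) 1).foldl FibonacciNegStepB ([], 1, 1)
      = (outL n, fibMag n, fibMag (n+1)) := by
  induction n with
  | zero => decide
  | succ m ih =>
    rw [show ((m+1 : Nat) : Int) = (m : Int) + 1 by push_cast; ring,
        PySem.List.pyRange_one_succ_right (by positivity),
        List.foldl_append, ih]
    simp only [List.foldl_cons, List.foldl_nil]
    exact stepB_eq m

lemma stepA_eq (k : Nat) :
    FibonacciNegStepA (outL (k+2), f1A (k+2), f2A (k+2)) ((k+2 : Nat) : Int)
      = (outL (k+3), f1A (k+3), f2A (k+3)) := by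
  unfold FibonacciNegStepA
  dsimp only
  rw [if_neg (by simp; omega), if_neg (by simp; omega)]
  have hf1 : f1A (k+2) = fsgn k * fibMag k := by simp [f1A]
  have hf2 : f2A (k+2) = fsgn (k+1) * fibMag (k+1) := by simp [f2A]
  rw [hf1, hf2, keyA, insert_end _ _ _ (outL_len (k+2)),
      show outL (k+3) = outL (k+2) ++ [fsgn (k+2) * fibMag (k+2)] from outL_succ (k+2)]
  refine Prod.ext rfl (Prod.ext ?_ ?_)
  · show fsgn (k+1) * fibMag (k+1) = f1A (k+3); simp [f1A]
  · show fsgn (k+2) * fibMag (k+2) = f2A (k+3); simp [f2A]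

lemma loopA_inv (n : Nat) :
    (PySem.List.pyRange 0 (n : Int) 1).foldl FibonacciNegStepA ([], 1, -1)
      = (outL n, f1A n, f2A n) := by
  induction n with
  | zero => decide
  | succ m ih =>
    rw [show ((m+1 : Nat) : Int) = (m : Int) + 1 by push_cast; ring,
        PySem.List.pyRange_one_succ_right (by positivity),
        List.foldl_append, ih]
    simp only [List.foldl_cons, List.foldl_nil]
    match m with
    | 0 => decide
    | 1 => decide
    | (k+2) => exact stepA_eq k

-- ===== VERDICT (by name: the statement is the Claim_ definition above) =====
theorem Fibonacci_Neg_spec : Claim_equal_Fibonacci_Neg := by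
  intro num _
  unfold Spec_Fibonacci_Neg Fibonacci_Neg Fibonacci_Neg_alt
  cases num with
  | ofNat n =>
    simp only [Int.ofNat_eq_natCast]
    rw [loopA_inv n, loopB_inv n]
  | negSucc n =>
    rw [PySem.List.pyRange_one_eq_nil (Int.negSucc_lt_zero n).le]
    rfl
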